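-- pv_equiv track=rewrite | github.com/xsaiter/isasln | src/olymp/acmp/06/0272/sol.py | solve
-- ===== SOURCE A (Python) =====
-- def solve(a):
--     mi = 20000
--     ma = -20000
--     for i in range(len(a)):
--         if (i + 1) % 2 == 0:
--             ma = max(ma, a[i])
--         else:
--             mi = min(mi, a[i])
--
--     return mi + ma
-- ===== SOURCE B (Python) =====
-- def solve(a):
--     mi = min([20000, *a[::2]])
--     ma = max([-20000, *a[1::2]])
--     return mi + ma
-- ===== Notes on version B (the rewrite author's own statement) =====
-- stated objective: simpler
-- what changed: Replaces the single parity-branched index loop with two strided slices a[::2] and a[1::2] reduced by builtin min/max, with the sentinels kept inside the argument lists.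
import Mathlib
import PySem

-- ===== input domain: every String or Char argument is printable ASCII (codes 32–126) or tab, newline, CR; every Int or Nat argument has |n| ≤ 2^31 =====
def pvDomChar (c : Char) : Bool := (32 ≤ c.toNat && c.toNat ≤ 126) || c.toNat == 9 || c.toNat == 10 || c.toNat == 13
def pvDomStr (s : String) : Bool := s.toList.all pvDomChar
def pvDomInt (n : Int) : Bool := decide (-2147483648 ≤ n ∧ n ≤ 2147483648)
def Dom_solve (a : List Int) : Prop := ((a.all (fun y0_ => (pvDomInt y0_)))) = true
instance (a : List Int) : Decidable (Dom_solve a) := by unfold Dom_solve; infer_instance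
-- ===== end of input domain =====

-- B replaces A's single parity-branched index loop by two strided slices reduced
-- with min/max (sentinels kept inside the reductions): simpler decomposition, same cost.

-- ===== PORT A =====
-- loop body of A's 'for i in range(len(a))'
def stepA (a : List Int) (s : Int × Int) (i : Int) : Int × Int :=
  if PySem.Int.mod (i + 1) 2 = 0 then (s.1, max s.2 (PySem.List.pyGetD a i 0))
  else (min s.1 (PySem.List.pyGetD a i 0), s.2)

def solve (a : List Int) : Int :=
  let r := (PySem.List.pyRange 0 (a.length : Int) 1).foldl (stepA a) (20000, -20000)
  r.1 + r.2

-- ===== PORT B =====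
def solve_alt (a : List Int) : Int :=
  let mi := ((PySem.List.slice? a none none 2).getD []).foldl min 20000
  let ma := ((PySem.List.slice? a (some 1) none 2).getD []).foldl max (-20000)
  mi + ma

-- ===== PRECONDITION & SPEC =====
def Spec_solve (a : List Int) (out : Int) : Prop := out = solve_alt a
instance (a : List Int) (out : Int) : Decidable (Spec_solve a out) := by unfold Spec_solve; infer_instance

-- ===== CLAIM (what is proved, stated in full; the proofs are below) =====
def Claim_equal_solve : Prop := ∀ (a : List Int), Dom_solve a → Spec_solve a (solve a)

-- ===== LEMMAS AND PROOFS =====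

-- elements at even (0-based) positions
def evp : List Int → List Int
  | [] => []
  | [x] => [x]
  | x :: _ :: t => x :: evp t

-- elements at odd (0-based) positions
def odp : List Int → List Int
  | [] => []
  | [_] => []
  | _ :: y :: t => y :: odp t

theorem fm_even (a : List Int) :
    List.filterMap (fun (k : Nat) => a[(2 * (k : Int)).toNat]?) (List.range (((a.length : Int) + 1) / 2).toNat) = evp a := by
  induction a using evp.induct with
  | case1 => rfl
  | case2 x =>
    norm_num [List.range_succ, List.filterMap_cons, evp]
  | case3 x y t ih =>
    have hc : ((((x :: y :: t).length : Int) + 1) / 2).toNat = (((t.length : Int) + 1) / 2).toNat + 1 := by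
      simp only [List.length_cons]; omega
    rw [hc, List.range_succ_eq_map, List.filterMap_cons, List.filterMap_map]
    have h0 : ((x :: y :: t)[(2 * ((0:Nat) : Int)).toNat]?) = some x := rfl
    rw [h0]
    have hf : ((fun (k : Nat) => (x :: y :: t)[(2 * (k : Int)).toNat]?) ∘ Nat.succ)
        = fun (k : Nat) => t[(2 * (k : Int)).toNat]? := by
      funext k
      have h1 : (2 * ((Nat.succ k : Nat) : Int)).toNat = 2 * k + 1 + 1 := by omega
      have h2 : (2 * ((k : Nat) : Int)).toNat = 2 * k := by omega
      simp only [Function.comp, h1, h2, List.getElem?_cons_succ]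
    rw [hf, ih]
    rfl

theorem fm_odd (a : List Int) :
    List.filterMap (fun (k : Nat) => a[(1 + 2 * (k : Int)).toNat]?) (List.range (((a.length : Int)) / 2).toNat) = odp a := by
  induction a using odp.induct with
  | case1 => rfl
  | case2 x =>
    norm_num [odp]
  | case3 x y t ih =>
    have hc : (((x :: y :: t).length : Int) / 2).toNat = (((t.length : Int)) / 2).toNat + 1 := by
      simp only [List.length_cons]; omega
    rw [hc, List.range_succ_eq_map, List.filterMap_cons, List.filterMap_map]
    have h0 : ((x :: y :: t)[(1 + 2 * ((0:Nat) : Int)).toNat]?) = some y := rfl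
    rw [h0]
    have hf : ((fun (k : Nat) => (x :: y :: t)[(1 + 2 * (k : Int)).toNat]?) ∘ Nat.succ)
        = fun (k : Nat) => t[(1 + 2 * (k : Int)).toNat]? := by
      funext k
      have h1 : (1 + 2 * ((Nat.succ k : Nat) : Int)).toNat = (2 * k + 1) + 1 + 1 := by omega
      have h2 : (1 + 2 * ((k : Nat) : Int)).toNat = 2 * k + 1 := by omega
      simp only [Function.comp, h1, h2, List.getElem?_cons_succ]
    rw [hf, ih]
    rfl

theorem slice_step2_even (a : List Int) :
    PySem.List.slice? a none none 2 = some (evp a) := by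
  simp only [PySem.List.slice?, PySem.List.sliceIndices]
  norm_num
  rw [show (if 0 < a.length then (((a.length : Int) + 2 - 1) / 2).toNat else 0)
      = (((a.length : Int) + 1) / 2).toNat from by split_ifs <;> omega]
  exact fm_even a

theorem slice_step2_odd (a : List Int) :
    PySem.List.slice? a (some 1) none 2 = some (odp a) := by
  simp only [PySem.List.slice?, PySem.List.sliceIndices]
  norm_num
  cases a with
  | nil => norm_num [odp]
  | cons z l =>
    rw [show min 1 (((z :: l).length : Int)) = 1 from by simp only [List.length_cons]; omega]
    rw [show (if 1 < (z :: l).length then ((((z :: l).length : Int) - 1 + 2 - 1) / 2).toNat else 0)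
        = ((((z :: l).length : Int)) / 2).toNat from by simp only [List.length_cons]; split_ifs <;> omega]
    exact fm_odd (z :: l)

theorem loopA_eq (t : List Int) : ∀ (a : List Int) (n : Nat), a.drop n = t → n % 2 = 0 →
    ∀ (mi ma : Int),
      (PySem.List.pyRange (n : Int) (a.length : Int) 1).foldl (stepA a) (mi, ma)
        = ((evp t).foldl min mi, (odp t).foldl max ma) := by
  induction t using evp.induct with
  | case1 =>
    intro a n hd _ mi ma
    have hlen : a.length ≤ n := List.drop_eq_nil_iff.mp hd
    rw [PySem.List.pyRange_one_eq_nil (by exact_mod_cast hlen)]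
    simp [evp, odp]
  | case2 x =>
    intro a n hd hn mi ma
    have h1 : a.length = n + 1 := by
      have := congrArg List.length hd
      simp at this; omega
    have hx : PySem.List.pyGetD a (↑n) 0 = x := by
      have h0 : a[n]? = some x := by
        have : (a.drop n)[0]? = some x := by rw [hd]; rfl
        simpa [List.getElem?_drop] using this
      rw [PySem.List.pyGetD_natCast, List.getD_eq_getElem?_getD, h0]; rfl
    have hmod : PySem.Int.mod ((n : Int) + 1) 2 = 1 := by
      rw [PySem.Int.mod_eq_emod_of_pos (by norm_num)]; omega
    rw [h1]
    push_cast
    rw [PySem.List.pyRange_one_singleton]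
    simp only [List.foldl_cons, List.foldl_nil]
    rw [show stepA a (mi, ma) (↑n) = (min mi x, ma) by
      simp only [stepA, hmod, hx]; norm_num]
    simp [evp, odp]
  | case3 x y t ih =>
    intro a n hd hn mi ma
    have hlen : a.length = n + 2 + t.length := by
      have h2 := congrArg List.length hd
      have h3 := List.length_drop (l := a) (i := n)
      have h4 : n ≤ a.length := by
        by_contra h
        have : a.drop n = [] := List.drop_eq_nil_of_le (by omega)
        rw [this] at hd; exact absurd hd (by simp)
      simp [h3] at h2; omega
    have hx : PySem.List.pyGetD a (↑n) 0 = x := by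
      have h0 : a[n]? = some x := by
        have : (a.drop n)[0]? = some x := by rw [hd]; rfl
        simpa [List.getElem?_drop] using this
      rw [PySem.List.pyGetD_natCast, List.getD_eq_getElem?_getD, h0]; rfl
    have hy : PySem.List.pyGetD a ((↑n) + 1) 0 = y := by
      have h0 : a[n+1]? = some y := by
        have : (a.drop n)[1]? = some y := by rw [hd]; rfl
        simpa [List.getElem?_drop] using this
      have : ((n : Int) + 1) = ((n + 1 : Nat) : Int) := by push_cast; ring
      rw [this, PySem.List.pyGetD_natCast, List.getD_eq_getElem?_getD, h0]; rfl
    have hmod1 : PySem.Int.mod ((n : Int) + 1) 2 = 1 := by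
      rw [PySem.Int.mod_eq_emod_of_pos (by norm_num)]; omega
    have hmod2 : PySem.Int.mod ((n : Int) + 1 + 1) 2 = 0 := by
      rw [PySem.Int.mod_eq_emod_of_pos (by norm_num)]; omega
    have hdrop : a.drop (n + 2) = t := by
      have h5 := List.drop_drop (i := 2) (j := n) (l := a)
      rw [← h5, hd]; rfl
    rw [PySem.List.pyRange_one_cons (by exact_mod_cast (by omega : (n:Int) < (a.length:Int)))]
    rw [PySem.List.pyRange_one_cons (by
      have : (n:Int) + 1 < (a.length:Int) := by exact_mod_cast (by omega : (n:Int)+1 < (a.length:Int))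
      exact this)]
    simp only [List.foldl_cons]
    rw [show stepA a (mi, ma) (↑n) = (min mi x, ma) by simp only [stepA, hmod1, hx]; norm_num]
    rw [show stepA a (min mi x, ma) ((↑n)+1) = (min mi x, max ma y) by simp only [stepA, hmod2, hy]; norm_num]
    have hcast : (n : Int) + 1 + 1 = ((n + 2 : Nat) : Int) := by push_cast; ring
    rw [hcast, ih a (n+2) hdrop (by omega) (min mi x) (max ma y)]
    simp [evp, odp]

theorem solve_eq (a : List Int) : solve a = solve_alt a := by
  have h := loopA_eq a a 0 (by simp) (by simp) 20000 (-20000)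
  simp only [Nat.cast_zero] at h
  simp [solve, solve_alt, h, slice_step2_even, slice_step2_odd]

-- ===== VERDICT (by name: the statement is the Claim_ definition above) =====
theorem solve_spec : Claim_equal_solve := by
  intro a _
  unfold Spec_solve
  exact solve_eq a
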